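-- pv_equiv track=rewrite | github.com/KKKZOZ/bilibili2text | b2t/converter/json_to_md.py | _join_paragraph_texts
-- ===== SOURCE A (Python) =====
-- def _join_paragraph_texts(parts: list[str]) -> str:
--     """Join paragraph text, avoiding different provider outputs being concatenated without spaces."""
--     if not parts:
--         return ""
--
--     merged = parts[0]
--     for part in parts[1:]:
--         if not part:
--             continue
--
--         if not merged:
--             merged = part
--             continue
--
--         if merged[-1].isspace() or part[0].isspace():
--             merged += part
--             continue
--
--         if merged[-1] in "，。！？,.!?;；:：、)]】}”\"'":
--             merged += part
--             continue
--
--         merged += " " + part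
--
--     return merged
-- ===== SOURCE B (Python) =====
-- _NO_SPACE_AFTER = "，。！？,.!?;；:：、)]】}”\"'"
--
--
-- def _join_paragraph_texts(parts: list[str]) -> str:
--     """Join paragraph text, avoiding different provider outputs being concatenated without spaces."""
--     segs = []          # chunks of the joined suffix, in reverse order
--     suffix_first = None  # first character of the joined suffix built so far
--     for part in reversed(parts):
--         if not part:
--             continue
--         if suffix_first is None:
--             segs.append(part)
--         elif part[-1].isspace() or suffix_first.isspace() or part[-1] in _NO_SPACE_AFTER:
--             segs.append(part)
--         else:
--             segs.append(" ")
--             segs.append(part)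
--         suffix_first = part[0]
--     return "".join(reversed(segs))
-- ===== Notes on version B (the rewrite author's own statement) =====
-- stated objective: alternative
-- what changed: B traverses the list right-to-left, building the result back-to-front as a reversed list of segments joined once at the end, and decides each separator from the current piece's last character and the tracked first character of the already-joined suffix (correct because that suffix always starts with the next nonempty piece's first character), instead of A's left-to-right string accumulator with an empty-accumulator bootstrap and adjacent-piece comparison.
import Mathlib
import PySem

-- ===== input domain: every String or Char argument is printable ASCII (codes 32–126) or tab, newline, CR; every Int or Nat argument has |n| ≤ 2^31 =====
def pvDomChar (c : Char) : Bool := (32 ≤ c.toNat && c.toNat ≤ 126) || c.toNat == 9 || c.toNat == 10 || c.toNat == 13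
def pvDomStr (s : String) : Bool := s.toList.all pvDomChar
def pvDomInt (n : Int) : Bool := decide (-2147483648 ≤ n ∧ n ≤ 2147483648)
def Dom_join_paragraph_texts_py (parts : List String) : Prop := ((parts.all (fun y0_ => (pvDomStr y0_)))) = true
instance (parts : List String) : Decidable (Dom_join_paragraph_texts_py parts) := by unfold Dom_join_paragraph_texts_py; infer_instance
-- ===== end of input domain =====

-- B traverses the list right-to-left, building the result back-to-front and deciding each
-- separator from the current piece's last char and the already-joined suffix's first char;
-- objective: alternative traversal order, same cost.

-- ===== PORT A =====
-- the punctuation set after which no space is inserted (the literal from the Python source)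
def pvPunct : List Char := "，。！？,.!?;；:：、)]】}”\"'".toList

-- one iteration of A's loop body over the accumulator `merged`
def pvStepA (merged : List Char) (part : List Char) : List Char :=
  if part = [] then merged
  else if merged = [] then part
  else if PySem.Chars.isspace (merged.getLastD ' ') || PySem.Chars.isspace (part.headD ' ') then
    merged ++ part
  else if (merged.getLastD ' ') ∈ pvPunct then merged ++ part
  else merged ++ [' '] ++ part

def join_paragraph_texts_py (parts : List String) : String :=
  match parts with
  | [] => ""
  | p0 :: rest => String.mk ((rest.map String.toList).foldl pvStepA p0.toList)

-- ===== PORT B =====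
-- one iteration of B's loop body: state = (segs, suffix_first)
def pvStepB (st : List (List Char) × Option Char) (part : List Char) :
    List (List Char) × Option Char :=
  if part = [] then st
  else
    match st.2 with
    | none => (st.1 ++ [part], some (part.headD ' '))
    | some c =>
      if PySem.Chars.isspace (part.getLastD ' ') || PySem.Chars.isspace c
          || (part.getLastD ' ') ∈ pvPunct then
        (st.1 ++ [part], some (part.headD ' '))
      else
        (st.1 ++ [[' ']] ++ [part], some (part.headD ' '))

def join_paragraph_texts_py_alt (parts : List String) : String :=
  String.mk ((((parts.map String.toList).reverse).foldl pvStepB ([], none)).1.reverse.flatten)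

-- ===== PRECONDITION & SPEC =====
def Spec_join_paragraph_texts_py (parts : List String) (out : String) : Prop := out = join_paragraph_texts_py_alt parts
instance (parts : List String) (out : String) : Decidable (Spec_join_paragraph_texts_py parts out) := by unfold Spec_join_paragraph_texts_py; infer_instance

-- ===== CLAIM (what is proved, stated in full; the proofs are below) =====
def Claim_equal_join_paragraph_texts_py : Prop := ∀ (parts : List String), Dom_join_paragraph_texts_py parts → Spec_join_paragraph_texts_py parts (join_paragraph_texts_py parts)

-- ===== LEMMAS AND PROOFS =====

-- canonical form: the segment contributed after the piece `prev` by the suffix `cur`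
def pvSegB (prev cur : List Char) : List Char :=
  if PySem.Chars.isspace (prev.getLastD ' ') || PySem.Chars.isspace (cur.headD ' ')
      || (prev.getLastD ' ') ∈ pvPunct then cur
  else ' ' :: cur

-- canonical join of a list of nonempty pieces
def pvJ (F : List (List Char)) : List Char :=
  match F with
  | [] => []
  | p0 :: rest => p0 ++ (List.zipWith pvSegB (p0 :: rest) rest).flatten

theorem pvSegB_ne_nil (a p : List Char) (hp : p ≠ []) : pvSegB a p ≠ [] := by
  unfold pvSegB; split <;> simp [hp]

theorem getLastD_append_right (l p : List Char) (hp : p ≠ []) (c : Char) :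
    (l ++ p).getLastD c = p.getLastD c := by
  rw [List.getLastD_eq_getLast?, List.getLastD_eq_getLast?, List.getLast?_append]
  cases h : p.getLast? with
  | none => exact absurd (List.getLast?_eq_none_iff.mp h) hp
  | some a => simp

-- the segment only depends on the previous piece through its last character
theorem pvSegB_congr (a b cur : List Char) (h : a.getLastD ' ' = b.getLastD ' ') :
    pvSegB a cur = pvSegB b cur := by
  unfold pvSegB; rw [h]

-- appending a segment ends with the piece's last char
theorem getLastD_seg (acc a p : List Char) (hp : p ≠ []) :
    (acc ++ pvSegB a p).getLastD ' ' = p.getLastD ' ' := by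
  unfold pvSegB
  split
  · exact getLastD_append_right acc p hp ' '
  · rw [show acc ++ (' ' :: p) = (acc ++ [' ']) ++ p by simp]
    exact getLastD_append_right (acc ++ [' ']) p hp ' '

theorem stepA_eq_seg (acc p : List Char) (ha : acc ≠ []) (hp : p ≠ []) :
    pvStepA acc p = acc ++ pvSegB acc p := by
  unfold pvStepA pvSegB
  simp only [if_neg hp, if_neg ha]
  split_ifs <;> simp_all

-- invariant of A's loop once the accumulator is nonempty
theorem foldA_eq (L : List (List Char)) : ∀ acc : List Char, acc ≠ [] →
    L.foldl pvStepA acc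
      = acc ++ (List.zipWith pvSegB (acc :: L.filter (fun p => p ≠ [])) (L.filter (fun p => p ≠ []))).flatten := by
  induction L with
  | nil => intro acc _; simp
  | cons p L ih =>
    intro acc ha
    by_cases hp : p = []
    · subst hp
      simp only [List.foldl_cons, pvStepA, List.filter_cons]
      simpa using ih acc ha
    · have hstep : pvStepA acc p = acc ++ pvSegB acc p := stepA_eq_seg acc p ha hp
      have ha' : acc ++ pvSegB acc p ≠ [] := by
        simp [pvSegB_ne_nil acc p hp]
      have hfilter : (p :: L).filter (fun q => q ≠ []) = p :: L.filter (fun q => q ≠ []) := by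
        simp [hp]
      rw [List.foldl_cons, hstep, ih _ ha', hfilter]
      cases hF : L.filter (fun q => q ≠ []) with
      | nil => simp
      | cons q F' =>
        rw [List.zipWith_cons_cons, List.zipWith_cons_cons, List.zipWith_cons_cons,
            List.flatten_cons, List.flatten_cons, List.flatten_cons,
            pvSegB_congr _ _ q (getLastD_seg acc acc p hp)]
        simp [List.append_assoc]

-- A's loop from the empty accumulator computes the canonical join of the nonempty pieces
theorem foldA_nil (L : List (List Char)) :
    L.foldl pvStepA [] = pvJ (L.filter (fun p => p ≠ [])) := by
  induction L with
  | nil => simp [pvJ]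
  | cons p L ih =>
    by_cases hp : p = []
    · subst hp
      simpa [List.filter_cons] using ih
    · have hstep : pvStepA [] p = p := by unfold pvStepA; simp [hp]
      rw [List.foldl_cons, hstep, foldA_eq L p hp]
      simp [hp, pvJ]

-- B's right-to-left loop: invariant tying the reversed segment list and tracked first
-- character to the canonical join of the nonempty pieces of the remaining suffix
theorem foldrB (L : List (List Char)) :
    (L.foldr (fun p st => pvStepB st p) ([], none)).1.reverse.flatten
        = pvJ (L.filter (fun p => p ≠ [])) ∧
    (L.foldr (fun p st => pvStepB st p) ([], none)).2
        = ((L.filter (fun p => p ≠ [])).head?).map (fun p => p.headD ' ') := by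
  induction L with
  | nil => simp [pvJ]
  | cons p L ih =>
    rw [List.foldr_cons]
    generalize hst : List.foldr (fun p st => pvStepB st p) ([], none) L = st at ih
    obtain ⟨ih1, ih2⟩ := ih
    by_cases hp : p = []
    · subst hp
      have hstep : pvStepB st [] = st := by unfold pvStepB; simp
      have hf : (([] : List Char) :: L).filter (fun q => q ≠ []) = L.filter (fun q => q ≠ []) := by
        simp
      rw [hstep, hf]
      exact ⟨ih1, ih2⟩
    · have hfilter : (p :: L).filter (fun q => q ≠ []) = p :: L.filter (fun q => q ≠ []) := by
        simp [hp]
      rw [hfilter]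
      cases hF : L.filter (fun q => q ≠ []) with
      | nil =>
        rw [hF] at ih1 ih2
        simp only [List.head?_nil, Option.map_none] at ih2
        unfold pvStepB
        rw [if_neg hp, ih2]
        simp [pvJ, ih1]
      | cons q F =>
        rw [hF] at ih1 ih2
        simp only [List.head?_cons, Option.map_some] at ih2
        unfold pvStepB
        rw [if_neg hp, ih2]
        by_cases h : (PySem.Chars.isspace (p.getLastD ' ') || PySem.Chars.isspace (q.headD ' ')
            || decide ((p.getLastD ' ') ∈ pvPunct)) = true
        · have hseg : pvSegB p q = q := by
            unfold pvSegB; rw [if_pos (by simpa using h)]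
          simp only [h, if_true]
          refine ⟨?_, by simp⟩
          simp [ih1, pvJ, hseg]
        · have hseg : pvSegB p q = ' ' :: q := by
            unfold pvSegB; rw [if_neg (by simpa using h)]
          simp only [h, Bool.false_eq_true, if_false]
          refine ⟨?_, by simp⟩
          simp [ih1, pvJ, hseg]

-- ===== VERDICT (by name: the statement is the Claim_ definition above) =====
theorem join_paragraph_texts_py_spec : Claim_equal_join_paragraph_texts_py := by
  intro parts _
  unfold Spec_join_paragraph_texts_py join_paragraph_texts_py_alt
  rw [List.foldl_reverse, (foldrB _).1]
  cases parts with
  | nil => rfl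
  | cons p0 rest =>
    show String.mk ((rest.map String.toList).foldl pvStepA p0.toList) = _
    by_cases h0 : p0.toList = []
    · rw [h0, foldA_nil]
      simp [h0]
    · rw [foldA_eq _ _ h0]
      simp [h0, pvJ]
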